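-- pv_equiv track=rewrite | github.com/skollmann/AdventOfCode | 2020/8b.py | execute
-- ===== SOURCE A (Python) =====
-- def execute(prog):
--     used = [False for _ in range(len(prog))]
--     acc = 0
--     pc = 0
--     while pc < len(prog):
--         if used[pc]:
--             return None
--         used[pc] = True
--         op, arg = prog[pc]
--         if op == 'acc':
--             acc += arg
--             pc += 1
--         elif op == 'jmp':
--             pc += arg
--         else:
--             pc += 1
--     return acc
-- ===== SOURCE B (Python) =====
-- def execute(prog):
--     n = len(prog)
--
--     def step(state):
--         acc, pc = state
--         if not (0 <= pc < n):
--             return state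
--         op, arg = prog[pc]
--         if op == 'acc':
--             return (acc + arg, pc + 1)
--         if op == 'jmp':
--             return (acc, pc + arg)
--         return (acc, pc + 1)
--
--     state = (0, 0)
--     for _ in range(n):
--         state = step(state)
--     acc, pc = state
--     return acc if pc >= n else None
-- ===== Notes on version B (the rewrite author's own statement) =====
-- stated objective: alternative
-- what changed: B drops A's visited list and early-exit loop entirely: it iterates a pure, total step function exactly len(prog) times (the step freezes the state once pc leaves [0,n)) and then reads termination off the final pc (pigeonhole: a terminating run exits within n steps); O(1) extra space. Pre_ excludes programs containing a jmp whose target index is negative, where A's returned value depends on Python's accidental negative-index wraparound of the visited list.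
-- outside the precondition, e.g. on execute([('jmp', 3), ('nop', 0), ('jmp', 6), ('jmp', -5)]): A returns 0, B returns None; on execute([('jmp', -1)]): A returns None, B returns None
import Mathlib
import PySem

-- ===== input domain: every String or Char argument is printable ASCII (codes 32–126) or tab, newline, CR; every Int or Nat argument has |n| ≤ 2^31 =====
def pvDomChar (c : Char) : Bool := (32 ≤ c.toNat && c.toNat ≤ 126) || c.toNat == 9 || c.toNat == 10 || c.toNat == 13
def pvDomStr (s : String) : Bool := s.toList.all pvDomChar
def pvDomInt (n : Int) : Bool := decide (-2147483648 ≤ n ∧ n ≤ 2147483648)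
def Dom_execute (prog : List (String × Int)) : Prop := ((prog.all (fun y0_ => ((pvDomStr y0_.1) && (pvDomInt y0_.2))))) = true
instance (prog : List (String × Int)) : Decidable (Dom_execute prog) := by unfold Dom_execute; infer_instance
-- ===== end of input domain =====

-- B replaces A's visited-list loop by iterating a pure, total step function len(prog) times
-- (the step freezes the state once pc leaves range) and reading termination off the final pc.

-- ===== PORT A =====
-- while loop as fuel recursion; prog.length+1 iterations always suffice under Pre_ (proved in the lemmas)
def executeLoopA (prog : List (String × Int)) : List Bool → Int → Int → Nat → Option Int
  | _, _, _, 0 => none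
  | used, acc, pc, fuel+1 =>
    if pc < (prog.length : Int) then
      match PySem.List.pyGet? used pc with
      | none => none  -- IndexError on used[pc] (outside Pre_)
      | some u =>
        if u then none
        else
          let used' := PySem.List.pySetD used pc true
          match PySem.List.pyGet? prog pc with
          | none => none  -- IndexError on prog[pc] (outside Pre_)
          | some oparg =>
            if oparg.1 = "acc" then executeLoopA prog used' (acc + oparg.2) (pc + 1) fuel
            else if oparg.1 = "jmp" then executeLoopA prog used' acc (pc + oparg.2) fuel
            else executeLoopA prog used' acc (pc + 1) fuel
    else some acc

def execute (prog : List (String × Int)) : Option Int :=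
  executeLoopA prog (List.replicate prog.length false) 0 0 (prog.length + 1)

-- ===== PORT B =====
-- the pure step function: state = (acc, pc); identity once pc is out of range
def stepB (prog : List (String × Int)) (st : Int × Int) : Int × Int :=
  if 0 ≤ st.2 ∧ st.2 < (prog.length : Int) then
    match PySem.List.pyGet? prog st.2 with
    | some oparg =>
      if oparg.1 = "acc" then (st.1 + oparg.2, st.2 + 1)
      else if oparg.1 = "jmp" then (st.1, st.2 + oparg.2)
      else (st.1, st.2 + 1)
    | none => st  -- unreachable under the range guard
  else st

def execute_alt (prog : List (String × Int)) : Option Int :=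
  let st := (List.range prog.length).foldl (fun s _ => stepB prog s) (0, 0)
  if (prog.length : Int) ≤ st.2 then some st.1 else none

-- ===== PRECONDITION & SPEC =====
-- Pre_ excludes programs containing a jmp whose target index i+arg is negative: there the
-- program counter can go negative and A's value depends on Python's negative-index wraparound
-- of the visited list (an accident of A's implementation), and B may return a different value.
def Pre_execute (prog : List (String × Int)) : Prop :=
  ∀ k : Nat, ∀ h : k < prog.length, prog[k].1 = "jmp" → 0 ≤ (k : Int) + prog[k].2
instance (prog : List (String × Int)) : Decidable (Pre_execute prog) := by
  unfold Pre_execute; infer_instance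

def pvWitness_execute : (List (String × Int)) := [("acc", 3), ("jmp", 1), ("nop", -2)]

def Spec_execute (prog : List (String × Int)) (out : Option Int) : Prop := out = execute_alt prog
instance (prog : List (String × Int)) (out : Option Int) : Decidable (Spec_execute prog out) := by unfold Spec_execute; infer_instance

-- ===== CLAIM (what is proved, stated in full; the proofs are below) =====
def Claim_equal_execute : Prop := ∀ (prog : List (String × Int)), Dom_execute prog → Pre_execute prog → Spec_execute prog (execute prog)

-- ===== LEMMAS AND PROOFS =====

-- pure semantics of one machine step (used only by the proofs)
def pcStep (prog : List (String × Int)) (pc : Int) : Int :=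
  if 0 ≤ pc ∧ pc < prog.length then
    (if (prog.getD pc.toNat ("", 0)).1 = "jmp" then pc + (prog.getD pc.toNat ("", 0)).2 else pc + 1)
  else pc

def accStep (prog : List (String × Int)) (pc acc : Int) : Int :=
  if 0 ≤ pc ∧ pc < prog.length then
    (if (prog.getD pc.toNat ("", 0)).1 = "acc" then acc + (prog.getD pc.toNat ("", 0)).2 else acc)
  else acc

def pcT (prog : List (String × Int)) : Nat → Int
  | 0 => 0
  | k+1 => pcStep prog (pcT prog k)

def accT (prog : List (String × Int)) : Nat → Int
  | 0 => 0
  | k+1 => accStep prog (pcT prog k) (accT prog k)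

def specRes (prog : List (String × Int)) : Option Int :=
  match (List.range (prog.length + 1)).find? (fun m => decide ((prog.length : Int) ≤ pcT prog m)) with
  | some m => some (accT prog m)
  | none => none

theorem getD_eq_getElem' (prog : List (String × Int)) (i : Nat) (h : i < prog.length) :
    prog.getD i ("", 0) = prog[i] := List.getD_eq_getElem prog ("", 0) h

theorem pc_nonneg (prog : List (String × Int)) (hp : Pre_execute prog) (k : Nat) :
    0 ≤ pcT prog k := by
  induction k with
  | zero => simp [pcT]
  | succ k ih =>
    show 0 ≤ pcStep prog (pcT prog k)
    unfold pcStep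
    split_ifs with h1 h2
    · -- jmp branch
      have hlt : (pcT prog k).toNat < prog.length := by omega
      rw [getD_eq_getElem' prog _ hlt] at h2 ⊢
      have := hp (pcT prog k).toNat hlt h2
      omega
    · omega
    · omega

-- once the pc leaves [0, n) it is fixed by pcStep
theorem pc_absorb (prog : List (String × Int)) (i t : Nat)
    (h : ¬ (0 ≤ pcT prog i ∧ pcT prog i < prog.length)) :
    pcT prog (i + t) = pcT prog i := by
  induction t with
  | zero => rfl
  | succ t ih =>
    show pcStep prog (pcT prog (i + t)) = pcT prog i
    rw [ih]
    unfold pcStep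
    simp [h]

-- … and the accumulator is fixed too
theorem acc_absorb (prog : List (String × Int)) (i t : Nat)
    (h : ¬ (0 ≤ pcT prog i ∧ pcT prog i < prog.length)) :
    accT prog (i + t) = accT prog i := by
  induction t with
  | zero => rfl
  | succ t ih =>
    show accStep prog (pcT prog (i + t)) (accT prog (i + t)) = accT prog i
    rw [ih, pc_absorb prog i t h]
    unfold accStep
    simp [h]

theorem pc_periodic (prog : List (String × Int)) (j k t : Nat)
    (h : pcT prog j = pcT prog k) : pcT prog (j + t) = pcT prog (k + t) := by
  induction t with
  | zero => exact h
  | succ t ih =>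
    show pcStep prog (pcT prog (j + t)) = pcStep prog (pcT prog (k + t))
    rw [ih]

-- pigeonhole helper
theorem inj_card_le (f : Nat → Int) (K n : Nat)
    (hd : ∀ j1 j2 : Nat, j1 < j2 → j2 ≤ K → f j1 ≠ f j2)
    (hr : ∀ j : Nat, j ≤ K → 0 ≤ f j ∧ f j < n) : K + 1 ≤ n := by
  have key := Fintype.card_le_of_injective
    (fun j : Fin (K+1) => (⟨(f j).toNat, by have := hr j (by omega); omega⟩ : Fin n)) ?_
  · simpa using key
  · intro a b hab
    have hab' : (f a).toNat = (f b).toNat := congrArg Fin.val hab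
    have ha := hr a (by omega)
    have hb := hr b (by omega)
    have heq : f a = f b := by omega
    by_contra hne
    have hne' : (a : Nat) ≠ (b : Nat) := fun hc => hne (Fin.ext hc)
    rcases Nat.lt_or_ge (a : Nat) (b : Nat) with hlt | hge
    · exact hd a b hlt (by omega) heq
    · have hlt : (b : Nat) < (a : Nat) := by omega
      exact hd b a hlt (by omega) heq.symm

-- a revisit of an in-range pc means the run never exits
theorem no_exit_of_revisit (prog : List (String × Int)) (hp : Pre_execute prog)
    (j k : Nat) (hjk : j < k) (heq : pcT prog j = pcT prog k)
    (hin : pcT prog k < prog.length) :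
    ∀ m : Nat, pcT prog m < prog.length := by
  have h0k : 0 ≤ pcT prog k := pc_nonneg prog hp k
  -- no index i ≤ k can be out of range (absorption would force pcT k out of range)
  have hle : ∀ i : Nat, i ≤ k → 0 ≤ pcT prog i ∧ pcT prog i < prog.length := by
    intro i hik
    by_contra hout
    have habs := pc_absorb prog i (k - i) hout
    have : i + (k - i) = k := by omega
    rw [this] at habs
    exact hout ⟨habs ▸ h0k, habs ▸ hin⟩
  -- strong induction on m
  intro m
  induction m using Nat.strong_induction_on with
  | _ m ih =>
    by_cases hmk : m ≤ k
    · exact (hle m hmk).2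
    · rw [Nat.not_le] at hmk
      have ht : m = j + (m - k) + (k - j) := by omega
      have hper : pcT prog (j + (m - k)) = pcT prog (k + (m - k)) := pc_periodic prog j k (m - k) heq
      have hm' : k + (m - k) = m := by omega
      rw [hm'] at hper
      have hsmall : j + (m - k) < m := by omega
      have hlt := ih (j + (m - k)) hsmall
      rw [hper] at hlt
      exact hlt

theorem find?_range_eq_some {p : Nat → Bool} {N k : Nat} (hk : k < N) (hpk : p k = true)
    (hmin : ∀ j, j < k → p j = false) : (List.range N).find? p = some k := by
  have hsplit : List.range N = List.range (k+1) ++ (List.range (N-(k+1))).map ((k+1) + ·) := by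
    rw [← List.range_add]; congr 1; omega
  have hnone : (List.range k).find? p = none := by
    rw [List.find?_eq_none]
    intro j hj
    simp only [List.mem_range] at hj
    simp [hmin j hj]
  rw [hsplit, List.find?_append, List.range_succ, List.find?_append, hnone]
  simp [List.find?, hpk]

-- one B-step agrees with the proof-level step semantics
theorem stepB_eq (prog : List (String × Int)) (acc pc : Int) :
    stepB prog (acc, pc) = (accStep prog pc acc, pcStep prog pc) := by
  unfold stepB accStep pcStep
  by_cases h : 0 ≤ pc ∧ pc < (prog.length : Int)
  · have hnat : pc.toNat < prog.length := by omega
    have hget : PySem.List.pyGet? prog pc = some (prog[pc.toNat]) :=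
      PySem.List.pyGet?_eq_some_getElem prog h.1 (by exact_mod_cast h.2)
    have h' : 0 ≤ pc ∧ pc < (prog.length : Int) := h
    rw [if_pos h, if_pos h', if_pos h', hget, getD_eq_getElem' prog _ hnat]
    by_cases hacc : prog[pc.toNat].1 = "acc"
    · have hjmp : prog[pc.toNat].1 ≠ "jmp" := by simp [hacc]
      simp [hacc, hjmp]
    · by_cases hjmp : prog[pc.toNat].1 = "jmp"
      · simp [hacc, hjmp]
      · simp [hacc, hjmp]
  · rw [if_neg h, if_neg h, if_neg h]

-- B's fold computes the k-step state
theorem foldB_eq (prog : List (String × Int)) (k : Nat) :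
    (List.range k).foldl (fun s _ => stepB prog s) (0, 0) = (accT prog k, pcT prog k) := by
  induction k with
  | zero => rfl
  | succ k ih =>
    rw [List.range_succ, List.foldl_append, ih]
    simp only [List.foldl_cons, List.foldl_nil]
    rw [stepB_eq]
    rfl

-- B computes specRes
theorem execute_alt_spec (prog : List (String × Int)) :
    execute_alt prog = specRes prog := by
  unfold execute_alt specRes
  rw [foldB_eq]
  rcases hfind : (List.range (prog.length + 1)).find?
      (fun m => decide ((prog.length : Int) ≤ pcT prog m)) with _ | m
  · -- no exit within n steps: in particular pcT n < n
    have hn := List.find?_eq_none.mp hfind prog.length (by simp)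
    simp only [decide_eq_true_eq] at hn
    simp [hn]
  · -- exit found at step m ≤ n: state is frozen from m on
    have hpm : (prog.length : Int) ≤ pcT prog m := by
      have := List.find?_some hfind
      simpa using this
    have hm : m ≤ prog.length := by
      have := List.mem_of_find?_eq_some hfind
      simp only [List.mem_range] at this
      omega
    have hout : ¬ (0 ≤ pcT prog m ∧ pcT prog m < prog.length) := by
      push_neg
      intro _
      omega
    have hpc : pcT prog prog.length = pcT prog m := by
      have := pc_absorb prog m (prog.length - m) hout
      rwa [show m + (prog.length - m) = prog.length by omega] at this
    have hacc : accT prog prog.length = accT prog m := by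
      have := acc_absorb prog m (prog.length - m) hout
      rwa [show m + (prog.length - m) = prog.length by omega] at this
    simp [hpc, hacc, hpm]

-- A's loop computes specRes
theorem loopA_spec (prog : List (String × Int)) (hp : Pre_execute prog) :
    ∀ (fuel k : Nat) (used : List Bool), k ≤ prog.length → fuel = prog.length + 1 - k →
    used.length = prog.length →
    (∀ i : Nat, ∀ h : i < used.length, (used[i] = true ↔ ∃ j, j < k ∧ pcT prog j = (i : Int))) →
    (∀ j1 j2 : Nat, j1 < j2 → j2 < k → pcT prog j1 ≠ pcT prog j2) →
    (∀ j, j < k → pcT prog j < prog.length) →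
    executeLoopA prog used (accT prog k) (pcT prog k) fuel = specRes prog := by
  intro fuel
  induction fuel with
  | zero => intro k used hk hf _ _ _ _; omega
  | succ fuel ih =>
    intro k used hk hf hlen hused hdist hprev
    by_cases hexit : (prog.length : Int) ≤ pcT prog k
    · have hfind : (List.range (prog.length + 1)).find?
          (fun m => decide ((prog.length : Int) ≤ pcT prog m)) = some k :=
        find?_range_eq_some (by omega) (by simp [hexit])
          (fun j hj => by simp [Int.not_le.mpr (hprev j hj)])
      simp [executeLoopA, Int.not_lt.mpr hexit, specRes, hfind]
    · rw [Int.not_le] at hexit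
      have h0 : 0 ≤ pcT prog k := pc_nonneg prog hp k
      have hnat : (pcT prog k).toNat < prog.length := by omega
      have hnatu : (pcT prog k).toNat < used.length := by omega
      have hcast : ((pcT prog k).toNat : Int) = pcT prog k := Int.toNat_of_nonneg h0
      have hgetu : PySem.List.pyGet? used (pcT prog k) = some (used[(pcT prog k).toNat]) :=
        PySem.List.pyGet?_eq_some_getElem used h0 (by omega)
      by_cases hu : used[(pcT prog k).toNat] = true
      · -- revisit: A returns None; the run never exits, so specRes is none
        obtain ⟨j, hj, hpj⟩ := (hused _ hnatu).mp hu
        have hpj' : pcT prog j = pcT prog k := by rw [hpj, hcast]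
        have hnoexit := no_exit_of_revisit prog hp j k hj hpj' hexit
        have hall : ∀ m ∈ List.range (prog.length + 1),
            ¬ ((fun m => decide ((prog.length : Int) ≤ pcT prog m)) m = true) := by
          intro m _
          simp [Int.not_le.mpr (hnoexit m)]
        have hfind := List.find?_eq_none.mpr hall
        simp [executeLoopA, hexit, hgetu, hu, specRes, hfind]
      · -- fresh pc: mark it and recurse
        rw [Bool.not_eq_true] at hu
        have hdist' : ∀ j1 j2 : Nat, j1 < j2 → j2 < k + 1 → pcT prog j1 ≠ pcT prog j2 := by
          intro j1 j2 h12 h2k hne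
          rcases Nat.lt_or_ge j2 k with h | h
          · exact hdist j1 j2 h12 h hne
          · have hj2 : j2 = k := by omega
            have : used[(pcT prog k).toNat] = true :=
              (hused _ hnatu).mpr ⟨j1, by omega, by rw [hne, hj2, hcast]⟩
            simp [hu] at this
        have hklt1 : k + 1 ≤ prog.length := by
          refine inj_card_le (pcT prog) k prog.length (fun j1 j2 h12 h2k => hdist' j1 j2 h12 (by omega)) ?_
          intro j hj
          rcases Nat.lt_or_ge j k with h | h
          · exact ⟨pc_nonneg prog hp j, hprev j h⟩
          · have : j = k := by omega
            subst this; exact ⟨h0, hexit⟩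
        have hget : PySem.List.pyGet? prog (pcT prog k) = some (prog[(pcT prog k).toNat]) :=
          PySem.List.pyGet?_eq_some_getElem prog h0 (by exact_mod_cast hexit)
        have hset : PySem.List.pySetD used (pcT prog k) true = used.set (pcT prog k).toNat true :=
          PySem.List.pySetD_of_nonneg used true h0
        have hlen' : (used.set (pcT prog k).toNat true).length = prog.length := by simp [hlen]
        have hused' : ∀ i : Nat, ∀ h : i < (used.set (pcT prog k).toNat true).length,
            ((used.set (pcT prog k).toNat true)[i] = true ↔ ∃ j, j < k + 1 ∧ pcT prog j = (i : Int)) := by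
          intro i hi
          rw [List.getElem_set]
          by_cases hieq : (pcT prog k).toNat = i
          · subst hieq
            rw [if_pos rfl]
            simp only [true_iff]
            exact ⟨k, by omega, hcast.symm⟩
          · rw [if_neg hieq]
            rw [hused i (by simpa using hi)]
            constructor
            · rintro ⟨j, hjk, hji⟩; exact ⟨j, by omega, hji⟩
            · rintro ⟨j, hjk, hji⟩
              rcases Nat.lt_or_ge j k with h | h
              · exact ⟨j, h, hji⟩
              · have : j = k := by omega
                subst this
                exact absurd (by omega : ((pcT prog j).toNat : Int) = (i : Int)) (by
                  intro hc
                  exact hieq (by exact_mod_cast hc))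

        have hrec := ih (k+1) (used.set (pcT prog k).toNat true) (by omega) (by omega)
          hlen' hused' hdist'
          (fun j hj => by rcases Nat.lt_or_ge j k with h | h
                          · exact hprev j h
                          · have : j = k := by omega
                            subst this; exact hexit)
        have hpc1 : pcT prog (k+1) = pcStep prog (pcT prog k) := rfl
        have hacc1 : accT prog (k+1) = accStep prog (pcT prog k) (accT prog k) := rfl
        unfold pcStep at hpc1
        unfold accStep at hacc1
        rw [if_pos ⟨h0, hexit⟩, getD_eq_getElem' prog _ hnat] at hpc1 hacc1
        rw [← hrec]
        simp only [executeLoopA, if_pos hexit, hgetu, hu, Bool.false_eq_true, if_false, hget, hset]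
        by_cases hacc : prog[(pcT prog k).toNat].1 = "acc"
        · simp [hpc1, hacc1, hacc]
        · by_cases hjmp : prog[(pcT prog k).toNat].1 = "jmp"
          · simp [hpc1, hacc1, hjmp]
          · simp [hpc1, hacc1, hacc, hjmp]

-- ===== VERDICT (by name: the statement is the Claim_ definition above) =====
theorem execute_spec : Claim_equal_execute := by
  intro prog _hd hp
  unfold Spec_execute execute
  have hA := loopA_spec prog hp (prog.length + 1) 0 (List.replicate prog.length false)
    (by omega) (by omega) (by simp)
    (by intro i h; simp)
    (by intro j1 j2 h1 h2; omega)
    (by intro j h; omega)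
  rw [execute_alt_spec]
  simpa [pcT, accT] using hA
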